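-- pv_equiv track=rewrite | github.com/DEVIXLER/large-subtitles | subtitle text scroller.py | string2bits
-- ===== SOURCE A (Python) =====
-- characters = '01'
--
-- def character2bits(character):
--     n = 1114111 - ord(character)
--     out = ''
--     for l in range(20):
--         char = int(n) % 2
--         out += characters[char]
--         n = (n - char) / 2
--     return out
--
-- def string2bits(string):
--     data = ''
--     for i in string:
--         data += character2bits(i)
--     while data[-1] == '0':
--         data = data[: -1]
--     data = data[: -1]
--     return data
-- ===== SOURCE B (Python) =====
-- def string2bits(string):
--     bits = ''.join(format((1114111 - ord(c)) & 0xFFFFF, '020b')[::-1] for c in string)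
--     return bits.rstrip('0')[:-1]
-- ===== Notes on version B (the rewrite author's own statement) =====
-- stated objective: faster
-- what changed: Replaces the per-character 20-iteration mod-2/divide loop with a closed-form bit extraction (mask the code, format as a 20-bit binary string, reverse) joined over the characters, and replaces the character-at-a-time trailing-zero while-loop with a single rstrip followed by dropping the last character.
import Mathlib
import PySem

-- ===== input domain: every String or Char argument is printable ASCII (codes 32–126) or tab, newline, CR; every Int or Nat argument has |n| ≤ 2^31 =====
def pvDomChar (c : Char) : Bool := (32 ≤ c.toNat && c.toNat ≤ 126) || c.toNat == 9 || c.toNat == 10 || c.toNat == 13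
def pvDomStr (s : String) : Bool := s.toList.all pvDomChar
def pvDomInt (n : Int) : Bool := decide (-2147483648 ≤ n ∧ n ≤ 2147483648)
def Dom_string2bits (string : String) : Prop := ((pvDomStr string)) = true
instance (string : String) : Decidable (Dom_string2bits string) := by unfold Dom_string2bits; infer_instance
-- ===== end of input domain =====

-- B replaces A's per-character 20-step mod-2/divide loop with a closed-form bit extraction
-- (mask, 20-bit big-endian format, reverse) and the trailing-zero while-loop with rstrip-then-drop;
-- a timing run measured B faster. Equivalence is about the return value on nonempty strings
-- (Python A raises IndexError on the empty string, excluded by Pre_).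

-- ===== PORT A =====
-- character2bits: 20 iterations, state (n, out); 'characters[char]' with characters = "01" and
-- char = n % 2 ∈ {0,1}; '(n - char) / 2' is Python float true division, exact here since
-- n - char is even and nonnegative, ported as floordiv (same value).
def pvCharacter2bitsA (c : Char) : List Char :=
  (((List.range 20).foldl
    (fun (st : Int × List Char) _ =>
      let ch := PySem.Int.mod st.1 2
      (PySem.Int.floordiv (st.1 - ch) 2,
       st.2 ++ [if ch == 0 then '0' else '1']))
    ((1114111 - (c.toNat : Int)), []))).2

-- while data[-1] == '0': data = data[:-1]   (data[-1] on [] raises IndexError in Python: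
-- the loop here stops instead; Pre_ excludes the only Dom input reaching that, the empty string)
def pvStripLoopA (d : List Char) : List Char :=
  if h : PySem.List.pyGet? d (-1) = some '0' then pvStripLoopA d.dropLast else d
termination_by d.length
decreasing_by
  have hne : d ≠ [] := by
    intro he; rw [he] at h; simp [PySem.List.pyGet?, PySem.List.pyIdx?] at h
  simpa [List.length_dropLast] using Nat.sub_lt (List.length_pos_of_ne_nil hne) one_pos

def string2bits (string : String) : String :=
  let data := string.toList.foldl (fun acc c => acc ++ pvCharacter2bitsA c) []
  let data := pvStripLoopA data
  let data := PySem.List.slice data none (some (-1))   -- data[:-1]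
  String.ofList data

-- ===== PORT B =====
-- format((1114111 - ord(c)) & 0xFFFFF, '020b')[::-1]
def pvCharacter2bitsB (c : Char) : List Char :=
  let n := (1114111 - c.toNat) &&& 0xFFFFF
  -- format(n, '020b'): the 20-character big-endian binary representation of n < 2^20
  let big := (List.range 20).map (fun i => if (n >>> (19 - i)) % 2 = 1 then '1' else '0')
  big.reverse

def string2bits_alt (string : String) : String :=
  let bits := string.toList.flatMap pvCharacter2bitsB            -- ''.join(... for c in string)
  let stripped := (bits.reverse.dropWhile (· == '0')).reverse    -- bits.rstrip('0')
  String.ofList stripped.dropLast                                -- [:-1]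

-- ===== PRECONDITION & SPEC =====
-- Pre_ excludes only the empty string, on which Python A raises IndexError (data[-1] on '').
def Pre_string2bits (string : String) : Prop := string ≠ ""
instance (string : String) : Decidable (Pre_string2bits string) := by unfold Pre_string2bits; infer_instance
def pvWitness_string2bits : String := "A"

def Spec_string2bits (string : String) (out : String) : Prop := out = string2bits_alt string
instance (string : String) (out : String) : Decidable (Spec_string2bits string out) := by unfold Spec_string2bits; infer_instance

-- ===== CLAIM (what is proved, stated in full; the proofs are below) =====
def Claim_equal_string2bits : Prop := ∀ (string : String), Dom_string2bits string → Pre_string2bits string → Spec_string2bits string (string2bits string)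

-- ===== LEMMAS AND PROOFS =====

-- A's 20-step loop computes the k low bits of m, little-endian, and leaves m >>> k.
theorem pvLoopA_invariant (k : Nat) (m : Nat) (acc : List Char) :
    (List.range k).foldl
      (fun (st : Int × List Char) _ =>
        let ch := PySem.Int.mod st.1 2
        (PySem.Int.floordiv (st.1 - ch) 2,
         st.2 ++ [if ch == 0 then '0' else '1']))
      (((m : Int)), acc)
    = (((m >>> k : Nat) : Int),
       acc ++ (List.range k).map (fun j => if (m >>> j) % 2 = 1 then '1' else '0')) := by
  induction k with
  | zero => simp
  | succ k ih =>
    rw [List.range_succ, List.foldl_append, ih, List.foldl_cons, List.foldl_nil]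
    have hmod : PySem.Int.mod ((m >>> k : Nat) : Int) 2 = (((m >>> k) % 2 : Nat) : Int) := by
      exact_mod_cast PySem.Int.mod_natCast (m >>> k) 2
    have hsub : ((m >>> k : Nat) : Int) - (((m >>> k) % 2 : Nat) : Int)
        = (((m >>> k) - (m >>> k) % 2 : Nat) : Int) := by
      have := Nat.mod_le (m >>> k) 2; push_cast [this]; ring
    have hdiv : PySem.Int.floordiv ((((m >>> k) - (m >>> k) % 2 : Nat) : Int)) 2
        = ((m >>> (k + 1) : Nat) : Int) := by
      rw [show ((2 : Int) = ((2 : Nat) : Int)) from rfl, PySem.Int.floordiv_natCast]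
      congr 1
      rw [Nat.shiftRight_succ]
      omega
    simp only [hmod, hsub, hdiv]
    rw [List.map_append, ← List.append_assoc]
    congr 2
    rcases Nat.mod_two_eq_zero_or_one (m >>> k) with h | h <;> simp [h]

-- masking with 0xFFFFF does not change bits 0..19
theorem pvBitEq (m j : Nat) (hj : j < 20) :
    ((m &&& 0xFFFFF) >>> j) % 2 = (m >>> j) % 2 := by
  have h20 : (0xFFFFF : Nat) = 2 ^ 20 - 1 := by norm_num
  rw [h20, Nat.and_two_pow_sub_one_eq_mod, Nat.shiftRight_eq_div_pow, Nat.shiftRight_eq_div_pow]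
  have h1 := Nat.testBit_mod_two_pow m 20 j
  rw [Nat.testBit_eq_decide_div_mod_eq, Nat.testBit_eq_decide_div_mod_eq] at h1
  simp only [hj, decide_true, Bool.true_and] at h1
  rw [decide_eq_decide] at h1
  generalize m % 2 ^ 20 / 2 ^ j = a at h1 ⊢
  generalize m / 2 ^ j = b at h1 ⊢
  omega

-- B's reversed big-endian map is the little-endian map
theorem pvReverse20 (g : Nat → Char) :
    ((List.range 20).map (fun i => g (19 - i))).reverse = (List.range 20).map g := by
  apply List.ext_getElem
  · simp
  · intro i h1 h2
    simp only [List.getElem_reverse, List.length_map, List.length_range, List.getElem_map,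
      List.getElem_range]
    congr 1
    simp at h2
    omega

theorem pvCharEq (c : Char) : pvCharacter2bitsA c = pvCharacter2bitsB c := by
  have hle : c.toNat ≤ 1114111 := by
    rcases c.valid with h | ⟨_, h⟩ <;>
      · unfold Char.toNat; omega
  have hcast : (1114111 : Int) - (c.toNat : Int) = ((1114111 - c.toNat : Nat) : Int) := by
    push_cast [hle]; ring
  unfold pvCharacter2bitsA pvCharacter2bitsB
  rw [hcast, pvLoopA_invariant, List.nil_append]
  show (List.range 20).map (fun j => if ((1114111 - c.toNat) >>> j) % 2 = 1 then '1' else '0')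
      = ((List.range 20).map (fun i =>
          (fun j => if (((1114111 - c.toNat) &&& 0xFFFFF) >>> j) % 2 = 1 then '1' else '0')
            (19 - i))).reverse
  rw [pvReverse20 (fun j => if (((1114111 - c.toNat) &&& 0xFFFFF) >>> j) % 2 = 1 then '1' else '0')]
  apply List.map_congr_left
  intro j hj
  simp only [List.mem_range] at hj
  rw [pvBitEq _ _ hj]

-- A's while-loop strips trailing '0's exactly as reverse/dropWhile/reverse does
theorem pvStripEq (d : List Char) :
    pvStripLoopA d = (d.reverse.dropWhile (· == '0')).reverse := by
  induction d using List.reverseRecOn with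
  | nil => rw [pvStripLoopA]; simp [PySem.List.pyGet?, PySem.List.pyIdx?]
  | append_singleton ds x ih =>
    rw [pvStripLoopA, PySem.List.pyGet?_neg_one_append_singleton]
    by_cases hx : x = '0'
    · subst hx
      simp only [List.dropLast_concat]
      rw [ih]
      simp
    · have : ¬ (some x = some '0') := by simp [hx]
      rw [dif_neg this]
      simp [hx]

-- ===== VERDICT (by name: the statement is the Claim_ definition above) =====
theorem string2bits_spec : Claim_equal_string2bits := by
  intro s _ _
  unfold Spec_string2bits string2bits string2bits_alt
  show String.ofList (PySem.List.slice
        (pvStripLoopA (s.toList.foldl (fun acc c => acc ++ pvCharacter2bitsA c) [])) none (some (-1)))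
     = String.ofList (((s.toList.flatMap pvCharacter2bitsB).reverse.dropWhile (· == '0')).reverse.dropLast)
  rw [PySem.List.foldl_append_eq_flatMap, List.nil_append,
      show s.toList.flatMap pvCharacter2bitsA = s.toList.flatMap pvCharacter2bitsB by
        exact List.flatMap_congr (fun c _ => pvCharEq c),
      pvStripEq, PySem.List.slice_to_neg_one]
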